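-- pv_equiv track=rewrite | github.com/Justype/bioinformatics | code/python/homework/my/seq_tools.py | get_orf
-- ===== SOURCE A (Python) =====
-- def reverse_complement(seq: str) -> str:
--     """
--     return reverse complement of the input DNA sequence
--     """
--     nt_pair = {"A": "T", "C": "G", "G": "C", "T": "A"}
--     return "".join([nt_pair[nt] for nt in seq[::-1]]) # just put things below together
--
--     seq_reverse = seq[::-1] # reverse the sequence
--     seq_rc = [nt_pair[nt] for nt in seq_reverse] # get the complement of reversed sequence
--     seq_rc = "".join(seq_rc) # make it into a string
--     return seq_rc
--
-- def translate(seq: str) -> str: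
--     """
--     translate the DNA sequence.
--     """
--     assert len(seq) % 3 == 0, "length {} is not divisible by 3".format(len(seq))
--
--     genetic_code = {'ATA': 'I', 'ATC': 'I', 'ATT': 'I', 'ATG': 'M', 'ACA': 'T', 'ACC': 'T', 'ACG': 'T', 'ACT': 'T', 'AAC': 'N', 'AAT': 'N', 'AAA': 'K', 'AAG': 'K', 'AGC': 'S', 'AGT': 'S', 'AGA': 'R', 'AGG': 'R', 'CTA': 'L', 'CTC': 'L', 'CTG': 'L', 'CTT': 'L', 'CCA': 'P', 'CCC': 'P', 'CCG': 'P', 'CCT': 'P', 'CAC': 'H', 'CAT': 'H', 'CAA': 'Q', 'CAG': 'Q', 'CGA': 'R', 'CGC': 'R', 'CGG': 'R',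
--                'CGT': 'R', 'GTA': 'V', 'GTC': 'V', 'GTG': 'V', 'GTT': 'V', 'GCA': 'A', 'GCC': 'A', 'GCG': 'A', 'GCT': 'A', 'GAC': 'D', 'GAT': 'D', 'GAA': 'E', 'GAG': 'E', 'GGA': 'G', 'GGC': 'G', 'GGG': 'G', 'GGT': 'G', 'TCA': 'S', 'TCC': 'S', 'TCG': 'S', 'TCT': 'S', 'TTC': 'F', 'TTT': 'F', 'TTA': 'L', 'TTG': 'L', 'TAC': 'Y', 'TAT': 'Y', 'TAA': '_', 'TAG': '_', 'TGC': 'C', 'TGT': 'C', 'TGA': '_', 'TGG': 'W'}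
--
--     return "".join([genetic_code[seq[i:i+3]] for i in range(0, len(seq), 3)]) # just put things below together
--     codons = [seq[i:i+3] for i in range(0, len(seq), 3)] # split the sequence of every 3 letters
--     aas = [genetic_code[codon] for codon in codons] # get a list of amino acids translated
--     aas = "".join(aas) # make it into a string
--     return aas
--
-- def get_orf(seq: str) -> list:
--     """
--     return a list of all open reading frames as amino acids
--     """
--     orf = []
--
--     frames = [seq[i:] for i in range(3)] # add 3 frames of forward sequence
--     seq_rc = reverse_complement(seq) # get reverse complete strand
--     frames.extend([seq_rc[i:] for i in range(3)]) # add 3 frames of reverse complete strand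
--
--     for frame in frames:
--         orf.extend(translate(frame[:len(frame) - len(frame) % 3]).split("_")) # translate the frame and split the amino acids by _(stop codon)
--     return [o for o in orf if o != ""] # remove the empty string
-- ===== SOURCE B (Python) =====
-- BASES = "TCAG"
-- # 64 amino acids in TCAG-major codon order; '_' marks stop codons
-- AA64 = "FFLLSSSSYY__CC_WLLLLPPPPHHQQRRRRIIIMTTTTNNKKSSRRVVVVAAAADDEEGGGG"
--
--
-- def get_orf(seq: str) -> list:
--     """
--     Return all open reading frames (amino-acid strings) of the six reading
--     frames, looking codons up by arithmetic index into a 64-char table and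
--     scanning each frame incrementally instead of translate/split/filter.
--     """
--     idx = [BASES.index(c) for c in seq]
--     rc_idx = [(i + 2) % 4 for i in reversed(idx)]
--     out = []
--     for strand in (idx, rc_idx):
--         for f in range(3):
--             pep = ""
--             k = f
--             while k + 3 <= len(strand):
--                 aa = AA64[16 * strand[k] + 4 * strand[k + 1] + strand[k + 2]]
--                 k += 3
--                 if aa == "_":
--                     if pep:
--                         out.append(pep)
--                     pep = ""
--                 else:
--                     pep += aa
--             if pep:
--                 out.append(pep)
--     return out
-- ===== Notes on version B (the rewrite author's own statement) =====
-- stated objective: alternative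
-- what changed: Replaces the dict-based translate-whole-frame / split('_') / filter pipeline by mapping the sequence to base indices once, computing the reverse complement arithmetically ((i+2)%4), looking each codon up by arithmetic index 16*i+4*j+k into a 64-char table, and scanning each frame incrementally while maintaining the current peptide.
import Mathlib
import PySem

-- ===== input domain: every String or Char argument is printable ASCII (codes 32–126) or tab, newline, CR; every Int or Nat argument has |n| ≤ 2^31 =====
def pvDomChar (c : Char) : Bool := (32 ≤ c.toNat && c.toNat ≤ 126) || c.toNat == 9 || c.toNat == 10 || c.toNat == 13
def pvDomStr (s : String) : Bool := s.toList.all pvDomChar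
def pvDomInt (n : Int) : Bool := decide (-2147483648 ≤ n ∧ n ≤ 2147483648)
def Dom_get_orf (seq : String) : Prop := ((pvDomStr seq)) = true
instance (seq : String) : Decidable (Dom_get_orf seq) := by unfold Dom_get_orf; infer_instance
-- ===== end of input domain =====

-- B maps the sequence to base indices "TCAG" once, complements arithmetically ((i+2)%4), looks
-- codons up by index 16*i+4*j+k in a 64-char table, and scans each frame incrementally
-- (objective: alternative, same cost).

-- ===== PORT A =====
-- the two constant tables of the Python module A (Python str chars ↔ Char)
def ntPair : PySem.Dict Char Char := PySem.Dict.ofList [('A','T'),('C','G'),('G','C'),('T','A')]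

def gcode : PySem.Dict String Char := PySem.Dict.ofList
  [("ATA",'I'),("ATC",'I'),("ATT",'I'),("ATG",'M'),("ACA",'T'),("ACC",'T'),("ACG",'T'),("ACT",'T'),
   ("AAC",'N'),("AAT",'N'),("AAA",'K'),("AAG",'K'),("AGC",'S'),("AGT",'S'),("AGA",'R'),("AGG",'R'),
   ("CTA",'L'),("CTC",'L'),("CTG",'L'),("CTT",'L'),("CCA",'P'),("CCC",'P'),("CCG",'P'),("CCT",'P'),
   ("CAC",'H'),("CAT",'H'),("CAA",'Q'),("CAG",'Q'),("CGA",'R'),("CGC",'R'),("CGG",'R'),("CGT",'R'),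
   ("GTA",'V'),("GTC",'V'),("GTG",'V'),("GTT",'V'),("GCA",'A'),("GCC",'A'),("GCG",'A'),("GCT",'A'),
   ("GAC",'D'),("GAT",'D'),("GAA",'E'),("GAG",'E'),("GGA",'G'),("GGC",'G'),("GGG",'G'),("GGT",'G'),
   ("TCA",'S'),("TCC",'S'),("TCG",'S'),("TCT",'S'),("TTC",'F'),("TTT",'F'),("TTA",'L'),("TTG",'L'),
   ("TAC",'Y'),("TAT",'Y'),("TAA",'_'),("TAG",'_'),("TGC",'C'),("TGT",'C'),("TGA",'_'),("TGG",'W')]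

-- genetic_code[key]; default '?' is only reached outside Pre_get_orf (Python raises KeyError there)
def gcD (cs : List Char) : Char := gcode.getD (String.ofList cs) '?'

-- "".join([nt_pair[nt] for nt in seq[::-1]])  (KeyError outside Pre_, excluded)
def reverse_complement (seq : String) : String :=
  String.ofList (seq.toList.reverse.map (fun nt => ntPair.getD nt '?'))

-- "".join([genetic_code[seq[i:i+3]] for i in range(0, len(seq), 3)]); the assert len%3==0 always
-- holds at A's call sites (frames are trimmed)
def translateA (s : List Char) : List Char :=
  (PySem.List.pyRange 0 (s.length : Int) 3).map
    (fun i => gcD (PySem.List.slice s (some i) (some (i + 3))))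

def get_orf (seq : String) : List String :=
  let frames := (PySem.List.pyRange 0 3 1).map (fun i => PySem.List.slice seq.toList (some i) none)
  let seq_rc := (reverse_complement seq).toList
  let frames2 := frames ++ (PySem.List.pyRange 0 3 1).map (fun i => PySem.List.slice seq_rc (some i) none)
  let orf := frames2.foldl (fun acc frame =>
      acc ++ PySem.Chars.splitOn
        (translateA (PySem.List.slice frame none
          (some ((frame.length : Int) - PySem.Int.mod (frame.length : Int) 3)))) ['_']) []
  (orf.filter (fun o => o ≠ [])).map (fun o => String.ofList o)

-- ===== PORT B =====
-- BASES = "TCAG"; BASES.index(c) (ValueError outside Pre_, excluded; idxOf then yields 4,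
-- sending every lookup through it to the '?' default)
def basesB : List Char := ['T', 'C', 'A', 'G']

def bIdx (c : Char) : Nat := basesB.idxOf c

-- AA64: the 64 amino acids in TCAG-major codon order, '_' = stop
def aa64 : List Char :=
  "FFLLSSSSYY__CC_WLLLLPPPPHHQQRRRRIIIMTTTTNNKKSSRRVVVVAAAADDEEGGGG".toList

-- the while-loop of Source B over the index list of one frame: eat three indices at a time,
-- growing the current peptide (advancing k by 3 = consuming the processed prefix)
def scanIdx : List Nat → List Char → List String → List String
  | i1 :: i2 :: i3 :: rest, pep, out =>
      let aa := aa64.getD (16 * i1 + 4 * i2 + i3) '?'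
      if aa = '_' then
        scanIdx rest [] (if pep ≠ [] then out ++ [String.ofList pep] else out)
      else scanIdx rest (pep ++ [aa]) out
  | _, pep, out => if pep ≠ [] then out ++ [String.ofList pep] else out

def get_orf_alt (seq : String) : List String :=
  let idx := seq.toList.map bIdx
  let rc_idx := idx.reverse.map (fun i => (i + 2) % 4)
  [idx, rc_idx].foldl
    (fun out strand =>
      (List.range 3).foldl (fun out f => scanIdx (strand.drop f) [] out) out)
    []

-- ===== PRECONDITION & SPEC =====
-- Pre_ excludes exactly the inputs with a character outside "ACGT", on which Python A raises
-- KeyError (and Python B raises ValueError)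
def Pre_get_orf (seq : String) : Prop :=
  seq.toList.all (fun c => c = 'A' || c = 'C' || c = 'G' || c = 'T') = true
instance (seq : String) : Decidable (Pre_get_orf seq) := by unfold Pre_get_orf; infer_instance

def pvWitness_get_orf : String := "ATGAAATAGTGA"

def Spec_get_orf (seq : String) (out : List String) : Prop := out = get_orf_alt seq
instance (seq : String) (out : List String) : Decidable (Spec_get_orf seq out) := by
  unfold Spec_get_orf; infer_instance

-- ===== CLAIM (what is proved, stated in full; the proofs are below) =====
def Claim_equal_get_orf : Prop :=
  ∀ (seq : String), Dom_get_orf seq → Pre_get_orf seq → Spec_get_orf seq (get_orf seq)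

-- ===== LEMMAS AND PROOFS =====

def isACGT (c : Char) : Bool := c = 'A' || c = 'C' || c = 'G' || c = 'T'

theorem acgt_cases (c : Char) (h : isACGT c = true) :
    c = 'A' ∨ c = 'C' ∨ c = 'G' ∨ c = 'T' := by
  simp [isACGT] at h; tauto

-- clean single-character splitter: what str.split("_") computes
def mySplit : List Char → List (List Char)
  | [] => [[]]
  | c :: t => if c = '_' then [] :: mySplit t else (mySplit t).modifyHead (c :: ·)

-- codon-chunk translation of a frame (A's dict), ignoring the (< 3 chars) tail
def chunkTr : List Char → List Char
  | c1 :: c2 :: c3 :: rest => gcD [c1, c2, c3] :: chunkTr rest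
  | _ => []

-- codon-chunk translation on base indices (B's table)
def chunkTrB : List Nat → List Char
  | i1 :: i2 :: i3 :: rest => aa64.getD (16 * i1 + 4 * i2 + i3) '?' :: chunkTrB rest
  | _ => []

theorem modifyHead_nil_append {α : Type} (l : List (List α)) :
    l.modifyHead (fun x => [] ++ x) = l := by cases l <;> simp

theorem go_spec (l : List Char) : ∀ (fuel : Nat) (cur : List Char) (acc : List (List Char)),
    l.length ≤ fuel →
    PySem.Chars.splitOn.go ['_'] fuel l cur acc
      = acc.reverse ++ (mySplit l).modifyHead (fun x => cur.reverse ++ x) := by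
  induction l with
  | nil =>
      intro fuel cur acc _
      cases fuel <;> · rw [PySem.Chars.splitOn.go.eq_def]; simp [mySplit]
  | cons c t ih =>
      intro fuel cur acc hle
      cases fuel with
      | zero => simp at hle
      | succ f =>
        rw [PySem.Chars.splitOn.go.eq_def]
        simp only [List.isPrefixOf, List.length_cons] at *
        by_cases hc : c = '_'
        · subst hc
          simp only [List.length_nil, List.drop_succ_cons, List.drop_zero]
          rw [ih f [] _ (by omega)]
          simp only [mySplit, List.reverse_cons, List.reverse_nil, List.nil_append,
            List.append_assoc, List.singleton_append]
          cases mySplit t <;> simp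
        · rw [if_neg (by simp [hc, BEq.comm])]
          rw [ih f (c :: cur) acc (by omega)]
          simp only [mySplit, if_neg hc]
          cases mySplit t <;> simp

theorem splitOn_eq_mySplit (s : List Char) : PySem.Chars.splitOn s ['_'] = mySplit s := by
  show PySem.Chars.splitOn.go ['_'] (s.length + 1) s [] [] = mySplit s
  rw [go_spec s (s.length + 1) [] [] (by omega)]
  simp only [List.reverse_nil, List.nil_append]
  cases mySplit s <;> simp

theorem chunkTr_take (s : List Char) : chunkTr (s.take (s.length - s.length % 3)) = chunkTr s := by
  induction s using chunkTr.induct with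
  | case1 c1 c2 c3 rest ih =>
      have h : (c1 :: c2 :: c3 :: rest).length - (c1 :: c2 :: c3 :: rest).length % 3
          = (rest.length - rest.length % 3) + 3 := by simp; omega
      rw [h]
      simp only [List.take_succ_cons, chunkTr]
      rw [show rest.length - rest.length % 3 + 2 + 1 = rest.length - rest.length % 3 + 3 from rfl] at *
      exact congrArg _ ih
  | case2 s h =>
      rcases s with _ | ⟨a, _ | ⟨b, _ | ⟨c, r⟩⟩⟩
      · rfl
      · rfl
      · rfl
      · exact absurd rfl (h a b c r)

theorem slice3 (xs : List Char) (j : Nat) :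
    PySem.List.slice xs (some (j : Int)) (some ((j : Int) + 3)) = (xs.drop j).take 3 := by
  have h : ((j : Int) + 3) = ((j + 3 : Nat) : Int) := by push_cast; ring
  rw [h, PySem.List.slice_natCast]
  congr 1
  omega

theorem slice_shift3 (a b c : Char) (r : List Char) (k : Nat) :
    PySem.List.slice (a :: b :: c :: r) (some (0 + 3 * ((k : Int) + 1))) (some (0 + 3 * ((k : Int) + 1) + 3))
      = PySem.List.slice r (some (0 + 3 * (k : Int))) (some (0 + 3 * (k : Int) + 3)) := by
  rw [show (0 + 3 * ((k : Int) + 1)) = ((3 * k + 3 : Nat) : Int) by push_cast; ring,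
      show (0 + 3 * (k : Int)) = ((3 * k : Nat) : Int) by push_cast; ring,
      slice3, slice3]
  apply congrArg (List.take 3)
  rw [show 3 * k + 3 = 3 + 3 * k by ring]
  rw [← List.drop_drop]
  rfl

theorem translateA_chunk : ∀ (m : Nat) (s : List Char), s.length = 3 * m →
    translateA s = chunkTr s := by
  intro m
  induction m with
  | zero =>
      intro s h
      have h0 : s = [] := List.eq_nil_of_length_eq_zero (by omega)
      subst h0
      rfl
  | succ m ih =>
      intro s h
      rcases s with _ | ⟨a, s⟩; · simp at h
      rcases s with _ | ⟨b, s⟩; · simp at h; omega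
      rcases s with _ | ⟨c, r⟩; · simp at h; omega
      have hr : r.length = 3 * m := by simp at h; omega
      show translateA (a :: b :: c :: r) = gcD [a, b, c] :: chunkTr r
      rw [← ih r hr]
      unfold translateA
      rw [PySem.List.pyRange_of_pos _ _ (by norm_num : (0:Int) < 3),
          PySem.List.pyRange_of_pos _ _ (by norm_num : (0:Int) < 3)]
      have h1 : ((((a :: b :: c :: r).length : Int) - 0 + 3 - 1) / 3).toNat = m + 1 := by
        simp only [List.length_cons]; push_cast; omega
      have h2 : (((r.length : Int) - 0 + 3 - 1) / 3).toNat = m := by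
        rw [hr]; omega
      rw [if_pos (by omega : (0:Int) < ((a :: b :: c :: r).length : Int)), h1]
      rw [List.range_succ_eq_map]
      simp only [List.map_cons, List.map_map]
      have hif : (if (0:Int) < ((r.length:Nat):Int) then (((r.length:Int) - 0 + 3 - 1)/3).toNat else 0) = m := by
        split <;> omega
      rw [hif]
      refine congrArg₂ List.cons ?_ ?_
      · show gcD (PySem.List.slice (a::b::c::r) (some (0 + 3 * ((0:Nat):Int))) (some (0 + 3 * ((0:Nat):Int) + 3))) = gcD [a,b,c]
        norm_num
        rw [show (3:Int) = ((3:Nat):Int) from rfl, PySem.List.slice_to_natCast]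
        simp
      · apply List.map_congr_left
        intro k _
        simp only [Function.comp_apply]
        apply congrArg
        push_cast
        exact slice_shift3 a b c r k

theorem chunkTrB_short (t : List Nat)
    (h : ∀ (i1 i2 i3 : Nat) (rest : List Nat), t ≠ i1 :: i2 :: i3 :: rest) :
    chunkTrB t = [] := by
  rcases t with _ | ⟨a, _ | ⟨b, _ | ⟨c, r⟩⟩⟩
  · rfl
  · rfl
  · rfl
  · exact absurd rfl (h a b c r)

-- table lookup agrees with A's dict on ACGT codons
set_option maxRecDepth 4096 in
theorem gc_eq (c1 c2 c3 : Char) (h1 : isACGT c1 = true) (h2 : isACGT c2 = true)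
    (h3 : isACGT c3 = true) :
    aa64.getD (16 * bIdx c1 + 4 * bIdx c2 + bIdx c3) '?' = gcD [c1, c2, c3] := by
  rcases acgt_cases c1 h1 with h | h | h | h <;> subst h <;>
    rcases acgt_cases c2 h2 with h | h | h | h <;> subst h <;>
      rcases acgt_cases c3 h3 with h | h | h | h <;> subst h <;> decide

theorem chunkTrB_map (l : List Char) (h : l.all isACGT = true) :
    chunkTrB (l.map bIdx) = chunkTr l := by
  induction l using chunkTr.induct with
  | case1 c1 c2 c3 rest ih =>
      simp only [List.all_cons, Bool.and_eq_true] at h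
      simp only [List.map_cons, chunkTrB, chunkTr]
      rw [gc_eq c1 c2 c3 h.1 h.2.1 h.2.2.1, ih h.2.2.2]
  | case2 s hs =>
      rcases s with _ | ⟨a, _ | ⟨b, _ | ⟨c, r⟩⟩⟩
      · rfl
      · rfl
      · rfl
      · exact absurd rfl (hs a b c r)

theorem scan_spec : ∀ (t : List Nat) (pep : List Char) (out : List String),
    scanIdx t pep out
      = out ++ (((mySplit (chunkTrB t)).modifyHead (fun x => pep ++ x)).filter (· ≠ [])).map
          (fun o => String.ofList o) := by
  intro t pep out
  fun_induction scanIdx t pep out with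
  | case1 i1 i2 i3 rest pep out aa haa ih =>
      rw [ih]
      simp only [chunkTrB]
      rw [show aa64.getD (16 * i1 + 4 * i2 + i3) '?' = aa from rfl, haa]
      simp only [mySplit, modifyHead_nil_append]
      by_cases hp : pep = [] <;> simp [hp]
  | case2 i1 i2 i3 rest pep out aa haa ih =>
      rw [ih]
      simp only [chunkTrB]
      rw [show aa64.getD (16 * i1 + 4 * i2 + i3) '?' = aa from rfl]
      simp only [mySplit, if_neg haa]
      cases hms : mySplit (chunkTrB rest) with
      | nil => simp
      | cons hd tl => simp
  | case3 t pep out hpep hmatch =>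
      rw [chunkTrB_short t (fun i1 i2 i3 rest hne => hmatch i1 i2 i3 rest hne)]
      simp [mySplit, hpep]
  | case4 t pep out hpep hmatch =>
      rw [chunkTrB_short t (fun i1 i2 i3 rest hne => hmatch i1 i2 i3 rest hne)]
      simp [mySplit, hpep]

-- A's per-frame contribution, in terms of the clean chunk translation
theorem frameA (fr : List Char) :
    PySem.Chars.splitOn
        (translateA (PySem.List.slice fr none
          (some ((fr.length : Int) - PySem.Int.mod (fr.length : Int) 3)))) ['_']
      = mySplit (chunkTr fr) := by
  have hmod : PySem.Int.mod ((fr.length : Nat) : Int) 3 = ((fr.length % 3 : Nat) : Int) := by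
    exact_mod_cast PySem.Int.mod_natCast fr.length 3
  have hb : ((fr.length : Int) - PySem.Int.mod ((fr.length : Nat) : Int) 3)
      = ((fr.length - fr.length % 3 : Nat) : Int) := by
    rw [hmod]; omega
  rw [hb, PySem.List.slice_to_natCast]
  rw [translateA_chunk ((fr.length - fr.length % 3) / 3) _
    (by rw [List.length_take]; omega)]
  rw [chunkTr_take, splitOn_eq_mySplit]

-- B's per-frame contribution equals A's, on an all-ACGT frame
theorem frameB (l : List Char) (h : l.all isACGT = true) (out : List String) :
    scanIdx (l.map bIdx) [] out
      = out ++ ((mySplit (chunkTr l)).filter (· ≠ [])).map (fun o => String.ofList o) := by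
  rw [scan_spec, modifyHead_nil_append, chunkTrB_map l h]

-- arithmetic complement agrees with A's nt_pair on ACGT
theorem comp_eq (c : Char) (h : isACGT c = true) :
    (bIdx c + 2) % 4 = bIdx (ntPair.getD c '?') := by
  rcases acgt_cases c h with h | h | h | h <;> subst h <;> decide

theorem comp_acgt (c : Char) (h : isACGT c = true) : isACGT (ntPair.getD c '?') = true := by
  rcases acgt_cases c h with h | h | h | h <;> subst h <;> decide

theorem all_drop {α : Type} (p : α → Bool) (l : List α) (n : Nat) (h : l.all p = true) :
    (l.drop n).all p = true := by
  rw [List.all_eq_true] at *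
  exact fun x hx => h x (List.mem_of_mem_drop hx)

-- ===== VERDICT (by name: the statement is the Claim_ definition above) =====
theorem get_orf_spec : Claim_equal_get_orf := by
  intro seq _ hpre
  unfold Spec_get_orf get_orf get_orf_alt
  have hall : seq.toList.all isACGT = true := hpre
  have s0 : ∀ xs : List Char, PySem.List.slice xs (some (0:Int)) none = xs.drop 0 := by
    intro xs; simp [pysem]
  have s1 : ∀ xs : List Char, PySem.List.slice xs (some (1:Int)) none = xs.drop 1 := by
    intro xs; simp [pysem]
  have s2 : ∀ xs : List Char, PySem.List.slice xs (some (2:Int)) none = xs.drop 2 := by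
    intro xs; simp [pysem]
  rw [show PySem.List.pyRange 0 3 1 = [0, 1, 2] from by decide,
      show List.range 3 = [0, 1, 2] from rfl]
  simp only [reverse_complement, String.toList_ofList, List.map_cons, List.map_nil,
    List.foldl_cons, List.foldl_nil, List.cons_append, List.nil_append, s0, s1, s2]
  have hrc : List.map (fun i => (i + 2) % 4) (List.map bIdx seq.toList).reverse
      = List.map bIdx (List.map (fun nt => ntPair.getD nt '?') seq.toList.reverse) := by
    rw [← List.map_reverse, List.map_map, List.map_map]
    apply List.map_congr_left
    intro c hc
    have : isACGT c = true := by
      rw [List.all_eq_true] at hall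
      exact hall c (List.mem_reverse.mp hc)
    exact comp_eq c this
  have hrcall : (List.map (fun nt => ntPair.getD nt '?') seq.toList.reverse).all isACGT = true := by
    rw [List.all_eq_true] at *
    intro x hx
    rcases List.mem_map.mp hx with ⟨c, hc, rfl⟩
    exact comp_acgt c (hall c (List.mem_reverse.mp hc))
  rw [hrc]
  have hrcall2 : ∀ n : Nat,
      (List.map (fun nt => ntPair.getD nt '?') (seq.toList.reverse.drop n)).all isACGT = true := by
    intro n
    rw [List.all_eq_true]
    intro x hx
    rcases List.mem_map.mp hx with ⟨c, hc, rfl⟩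
    have : c ∈ seq.toList := List.mem_reverse.mp (List.mem_of_mem_drop hc)
    rw [List.all_eq_true] at hall
    exact comp_acgt c (hall c this)
  simp only [← List.map_drop]
  rw [frameB _ (all_drop _ _ 0 hall), frameB _ (all_drop _ _ 1 hall),
      frameB _ (all_drop _ _ 2 hall), frameB _ (hrcall2 0), frameB _ (hrcall2 1),
      frameB _ (hrcall2 2)]
  simp only [frameA, List.filter_append, List.map_append, List.append_assoc, List.nil_append]
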